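-- pv_equiv track=rewrite | github.com/serhio1212/subtitles_srt | changer100charactersinline.py | CorrectData
-- ===== SOURCE A (Python) =====
-- def CorrectData(time_arr, text_arr):
--     correct_time_arr = []
--     correct_text_arr = []
--     tmp_string = ""
--     buffer_item = ""
--     buffer_count = 0
--     first = 0
--     for count, item in enumerate(text_arr, start=0):
--         # print (f'Length array {count}, {item}')
--         buffer_item = buffer_item+ " " + item
--         if len(buffer_item) > 100:
--             correct_text_arr.append(buffer_item)
--             if first !=0:
--                 correct_time_arr.append([time_arr[count-buffer_count][2], "-->", time_arr[count][2]])
--             else: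
--                 correct_time_arr.append([time_arr[count-buffer_count][0], "-->", time_arr[count][2]])
--                 first+=1
--             buffer_count =0
--             buffer_item = ""
--         buffer_count = buffer_count + 1
--     correct_text_arr.append(buffer_item)
--     correct_time_arr.append([time_arr[count-buffer_count+1][2], "-->", time_arr[count][2]])
--     # print (f'Correct array {correct_time_arr}')
--     # print (f'Correct array {correct_text_arr}')
--     return correct_time_arr, correct_text_arr
-- ===== SOURCE B (Python) =====
-- def CorrectData(time_arr, text_arr):
--     # pass 1: find the cut indices (where the accumulated length first exceeds 100)
--     cuts = []
--     acc = 0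
--     for i, w in enumerate(text_arr):
--         acc += 1 + len(w)
--         if acc > 100:
--             cuts.append(i)
--             acc = 0
--     last = len(text_arr) - 1
--     # pass 2: build the chunks and time triples from the cut indices
--     times, texts = [], []
--     prev = 0   # cut index of the previous chunk (0 before any chunk)
--     begin = 0  # text index where the current chunk begins
--     for k, c in enumerate(cuts):
--         texts.append(''.join(' ' + w for w in text_arr[begin:c + 1]))
--         times.append([time_arr[prev][2 if k else 0], '-->', time_arr[c][2]])
--         prev, begin = c, c + 1
--     texts.append(''.join(' ' + w for w in text_arr[begin:]))
--     times.append([time_arr[prev][2], '-->', time_arr[last][2]])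
--     return times, texts
-- ===== Notes on version B (the rewrite author's own statement) =====
-- stated objective: alternative
-- what changed: B replaces A's single accumulate-and-flush loop (string buffer, buffer_count, first flag, index arithmetic) with two passes: pass 1 records only the cut indices with a running length counter, pass 2 builds each text chunk by slicing-and-joining text_arr and each time triple directly from consecutive cut indices.
import Mathlib
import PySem

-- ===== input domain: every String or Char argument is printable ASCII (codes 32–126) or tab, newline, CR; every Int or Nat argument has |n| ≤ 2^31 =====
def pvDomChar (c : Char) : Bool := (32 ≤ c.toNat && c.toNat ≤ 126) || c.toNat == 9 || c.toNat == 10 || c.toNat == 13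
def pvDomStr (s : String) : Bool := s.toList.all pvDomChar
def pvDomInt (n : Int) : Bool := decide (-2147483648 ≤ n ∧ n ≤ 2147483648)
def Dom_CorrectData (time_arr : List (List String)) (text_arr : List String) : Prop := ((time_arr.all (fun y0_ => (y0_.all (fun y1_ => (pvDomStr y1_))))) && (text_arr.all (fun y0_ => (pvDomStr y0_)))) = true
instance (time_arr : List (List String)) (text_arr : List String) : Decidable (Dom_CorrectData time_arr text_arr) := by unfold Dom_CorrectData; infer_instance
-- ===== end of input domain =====

-- B re-decomposes A's single accumulate-and-flush loop into two passes: pass 1 records the cut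
-- indices with a running length counter, pass 2 builds the chunks and time triples from them
-- (objective: alternative decomposition, same cost). Return values only; neither mutates inputs.

-- ===== PORT A =====
def pvTime (t : List (List String)) (i k : Int) : String :=
  PySem.List.pyGetD (PySem.List.pyGetD t i []) k ""

def pvStepA (t : List (List String))
    (s : List (List String) × List String × List Char × Int × Int × Int)
    (ci : Int × String) : List (List String) × List String × List Char × Int × Int × Int :=
  match s, ci with
  | (ct, cx, buf, bc, first, _), (count, item) =>
    let buf := buf ++ ' ' :: item.toList
    if PySem.Chars.len buf > 100 then
      let cx := cx ++ [String.ofList buf]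
      if first ≠ 0 then
        (ct ++ [[pvTime t (count - bc) 2, "-->", pvTime t count 2]], cx,
         ([] : List Char), (0 : Int) + 1, first, count)
      else
        (ct ++ [[pvTime t (count - bc) 0, "-->", pvTime t count 2]], cx,
         ([] : List Char), (0 : Int) + 1, first + 1, count)
    else
      (ct, cx, buf, bc + 1, first, count)

def CorrectData (time_arr : List (List String)) (text_arr : List String) :
    List (List String) × List String :=
  match (PySem.List.enumerate text_arr 0).foldl (pvStepA time_arr) ([], [], [], 0, 0, 0) with
  | (ct, cx, buf, bc, _, count) =>
    (ct ++ [[pvTime time_arr (count - bc + 1) 2, "-->", pvTime time_arr count 2]],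
     cx ++ [String.ofList buf])

-- ===== PORT B =====
def pvChunk (text_arr : List String) (b : Int) (e? : Option Int) : String :=
  String.ofList (PySem.Chars.join []
    ((PySem.List.slice text_arr (some b) e?).map (fun w => ' ' :: w.toList)))

def pvStep1 (s : List Int × Int) (ci : Int × String) : List Int × Int :=
  match s, ci with
  | (cuts, acc), (i, w) =>
    let acc := acc + 1 + PySem.Str.len w
    if acc > 100 then (cuts ++ [i], 0) else (cuts, acc)

def pvStep2 (t : List (List String)) (ta : List String)
    (s : List (List String) × List String × Int × Int) (kc : Int × Int) :
    List (List String) × List String × Int × Int :=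
  match s, kc with
  | (times, texts, prev, bgn), (k, c) =>
    (times ++ [[pvTime t prev (if k ≠ 0 then 2 else 0), "-->", pvTime t c 2]],
     texts ++ [pvChunk ta bgn (some (c + 1))],
     c, c + 1)

def CorrectData_alt (time_arr : List (List String)) (text_arr : List String) :
    List (List String) × List String :=
  let cuts := ((PySem.List.enumerate text_arr 0).foldl pvStep1 ([], 0)).1
  let last : Int := PySem.List.len text_arr - 1
  match (PySem.List.enumerate cuts 0).foldl (pvStep2 time_arr text_arr) ([], [], 0, 0) with
  | (times, texts, prev, bgn) =>
    (times ++ [[pvTime time_arr prev 2, "-->", pvTime time_arr last 2]],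
     texts ++ [pvChunk text_arr bgn none])

-- ===== PRECONDITION & SPEC =====
-- Pre_ excludes: text_arr = [] (A's `count` is unbound at the final flush → NameError), and
-- time_arr shorter than text_arr or a row among the first len(text_arr) shorter than 3
-- (IndexError).  The row-length condition covers all first len(text_arr) rows — slightly
-- stronger than the rows A actually indexes (only chunk boundaries) — to stay closed-form.
def Pre_CorrectData (time_arr : List (List String)) (text_arr : List String) : Prop :=
  text_arr ≠ [] ∧ text_arr.length ≤ time_arr.length ∧
    ∀ row ∈ time_arr.take text_arr.length, 3 ≤ row.length
instance (time_arr : List (List String)) (text_arr : List String) :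
    Decidable (Pre_CorrectData time_arr text_arr) := by unfold Pre_CorrectData; infer_instance

def pvWitness_CorrectData : List (List String) × List String :=
  ([["00:00:01", "-->", "00:00:02"]], ["hello"])

def Spec_CorrectData (time_arr : List (List String)) (text_arr : List String) (out : List (List String) × List String) : Prop := out = CorrectData_alt time_arr text_arr
instance (time_arr : List (List String)) (text_arr : List String) (out : List (List String) × List String) : Decidable (Spec_CorrectData time_arr text_arr out) := by unfold Spec_CorrectData; infer_instance

-- ===== CLAIM (what is proved, stated in full; the proofs are below) =====
def Claim_equal_CorrectData : Prop := ∀ (time_arr : List (List String)) (text_arr : List String), Dom_CorrectData time_arr text_arr → Pre_CorrectData time_arr text_arr → Spec_CorrectData time_arr text_arr (CorrectData time_arr text_arr)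

-- ===== LEMMAS AND PROOFS =====

def pvPass2 (t : List (List String)) (ta : List String) (cuts : List Int) :
    List (List String) × List String × Int × Int :=
  (PySem.List.enumerate cuts 0).foldl (pvStep2 t ta) ([], [], 0, 0)

def pvPrevD (cuts : List Int) : Int := cuts.getLast?.getD 0
def pvBeginD (cuts : List Int) : Int :=
  match cuts.getLast? with
  | none => 0
  | some c => c + 1
def pvFirstD (cuts : List Int) : Int := if cuts = [] then 0 else 1

def pvChunkL (ta : List String) (b : Int) (e? : Option Int) : List Char :=
  PySem.Chars.join [] ((PySem.List.slice ta (some b) e?).map (fun w => ' ' :: w.toList))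

lemma pvPass2_snoc (t : List (List String)) (ta : List String) (cuts : List Int) (c : Int) :
    pvPass2 t ta (cuts ++ [c]) =
      ((pvPass2 t ta cuts).1 ++
         [[pvTime t (pvPass2 t ta cuts).2.2.1 (if (cuts.length : Int) ≠ 0 then 2 else 0),
           "-->", pvTime t c 2]],
       (pvPass2 t ta cuts).2.1 ++ [pvChunk ta (pvPass2 t ta cuts).2.2.2 (some (c + 1))],
       c, c + 1) := by
  unfold pvPass2
  rw [PySem.List.enumerate_append, List.foldl_append]
  rcases h : (PySem.List.enumerate cuts 0).foldl (pvStep2 t ta) ([], [], 0, 0) with ⟨a, b, p, q⟩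
  simp [PySem.List.enumerate, pvStep2]

lemma pvPass2_prev_begin (t : List (List String)) (ta : List String) (cuts : List Int) :
    (pvPass2 t ta cuts).2.2 = (pvPrevD cuts, pvBeginD cuts) := by
  induction cuts using List.reverseRecOn with
  | nil => rfl
  | append_singleton xs x ih =>
      rw [pvPass2_snoc]
      simp [pvPrevD, pvBeginD]

lemma pvJoin_nil (l : List (List Char)) : PySem.Chars.join [] l = l.flatten := by
  show [].intercalate l = l.flatten
  induction l with
  | nil => rfl
  | cons x xs ih => cases xs <;> simp_all [List.intercalate, List.intersperse, List.flatten]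

lemma pvChunkL_snoc (ta : List String) (b : Int) (s : Nat) (w : String) (ws : List String)
    (hd : ta.drop s = w :: ws) (hb : 0 ≤ b) (hbs : b ≤ (s : Int)) :
    pvChunkL ta b (some (s : Int)) ++ ' ' :: w.toList = pvChunkL ta b (some ((s : Int) + 1)) := by
  unfold pvChunkL
  rw [PySem.List.slice_toNat ta hb (by omega), PySem.List.slice_toNat ta hb (by omega), pvJoin_nil, pvJoin_nil]
  have hbn : b.toNat ≤ s := by omega
  have hsl : s < ta.length := by
    by_contra h
    rw [List.drop_eq_nil_of_le (by omega)] at hd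
    simp at hd
  have hget : (ta.drop b.toNat)[s - b.toNat]? = some w := by
    rw [List.getElem?_drop]
    have : b.toNat + (s - b.toNat) = s := by omega
    rw [this]
    have : ta[s]? = some w := by
      have := congrArg (fun l => l[0]?) hd
      simpa [List.getElem?_drop] using this
    exact this
  have h1 : ((s : Int)).toNat = s := by omega
  have h2 : ((s : Int) + 1).toNat = s + 1 := by omega
  rw [h1, h2]
  have : s + 1 - b.toNat = (s - b.toNat) + 1 := by omega
  rw [this, List.take_add_one, hget]
  simp

lemma pvChunkL_empty (ta : List String) (s : Nat) :
    pvChunkL ta ((s : Int) + 1) (some ((s : Int) + 1)) = [] := by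
  unfold pvChunkL
  rw [PySem.List.slice_toNat ta (by omega) (by omega)]
  simp

lemma pvChunkL_to_none (ta : List String) (b : Int) (hb : 0 ≤ b) :
    pvChunkL ta b (some (ta.length : Int)) = pvChunkL ta b none := by
  unfold pvChunkL
  rw [PySem.List.slice_toNat ta hb (by omega), PySem.List.slice_from ta hb]
  congr 1
  rw [List.take_of_length_le (by simp [List.length_drop])]

lemma pvChunk_eq (ta : List String) (b : Int) (e? : Option Int) :
    pvChunk ta b e? = String.ofList (pvChunkL ta b e?) := rfl

lemma pvLenSnoc (buf : List Char) (w : String) :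
    PySem.Chars.len (buf ++ ' ' :: w.toList) = PySem.Chars.len buf + 1 + PySem.Str.len w := by
  simp [PySem.Chars.len_eq, PySem.Str.len_eq]
  omega

lemma pvBeginD_snoc (cuts : List Int) (c : Int) : pvBeginD (cuts ++ [c]) = c + 1 := by
  simp [pvBeginD]
lemma pvPrevD_snoc (cuts : List Int) (c : Int) : pvPrevD (cuts ++ [c]) = c := by
  simp [pvPrevD]
lemma pvFirstD_snoc (cuts : List Int) (c : Int) : pvFirstD (cuts ++ [c]) = 1 := by
  simp [pvFirstD]

lemma pvLoop_eq (t : List (List String)) (ta : List String) :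
    ∀ (ws : List String) (s : Nat) (cuts : List Int) (c0 : Int),
      ta.drop s = ws → s ≤ ta.length →
      0 ≤ pvBeginD cuts → pvBeginD cuts ≤ (s : Int) →
      (let cuts' := ((PySem.List.enumerate ws (s : Int)).foldl pvStep1
          (cuts, PySem.Chars.len (pvChunkL ta (pvBeginD cuts) (some (s : Int))))).1
       0 ≤ pvBeginD cuts' ∧ pvBeginD cuts' ≤ (ta.length : Int) ∧
       (PySem.List.enumerate ws (s : Int)).foldl (pvStepA t)
        ((pvPass2 t ta cuts).1, (pvPass2 t ta cuts).2.1,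
         pvChunkL ta (pvBeginD cuts) (some (s : Int)), (s : Int) - pvPrevD cuts, pvFirstD cuts, c0) =
       ((pvPass2 t ta cuts').1, (pvPass2 t ta cuts').2.1,
        pvChunkL ta (pvBeginD cuts') (some (ta.length : Int)),
        (ta.length : Int) - pvPrevD cuts', pvFirstD cuts',
        if ws = [] then c0 else (ta.length : Int) - 1)) := by
  intro ws
  induction ws with
  | nil =>
      intro s cuts c0 hd hs hb0 hbs
      have hsl : s = ta.length := by
        have := List.drop_eq_nil_iff.mp hd
        omega
      subst hsl
      exact ⟨hb0, hbs, by simp [PySem.List.enumerate]⟩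
  | cons w ws ih =>
      intro s cuts c0 hd hs hb0 hbs
      have hsl : s < ta.length := by
        by_contra h
        rw [List.drop_eq_nil_of_le (by omega)] at hd
        simp at hd
      have hd' : ta.drop (s + 1) = ws := by
        rw [← List.tail_drop, hd]
        rfl
      have hbufsnoc := pvChunkL_snoc ta (pvBeginD cuts) s w ws hd hb0 hbs
      have htrail : (if ws = [] then (s : Int) else (ta.length : Int) - 1)
          = (ta.length : Int) - 1 := by
        by_cases hws : ws = []
        · have : ta.length = s + 1 := by
            rw [hws] at hd'
            have := List.drop_eq_nil_iff.mp hd'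
            omega
          simp [hws, this]
        · simp [hws]
      rw [PySem.List.enumerate_cons, List.foldl_cons, List.foldl_cons]
      simp only [pvStepA, pvStep1, hbufsnoc]
      have hlen : PySem.Chars.len (pvChunkL ta (pvBeginD cuts) (some ((s : Int) + 1)))
          = PySem.Chars.len (pvChunkL ta (pvBeginD cuts) (some (s : Int))) + 1 + PySem.Str.len w := by
        rw [← hbufsnoc, pvLenSnoc]
      rw [← hlen]
      rw [if_neg (show ¬(w :: ws = ([] : List String)) by simp)]
      by_cases hc : PySem.Chars.len (pvChunkL ta (pvBeginD cuts) (some ((s : Int) + 1))) > 100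
      · -- flush at index s
        rw [if_pos hc, if_pos hc]
        obtain ⟨ih1, ih2, ih3⟩ := ih (s + 1) (cuts ++ [(s : Int)]) (s : Int) hd' (by omega)
          (by rw [pvBeginD_snoc]; omega) (by rw [pvBeginD_snoc]; push_cast; omega)
        push_cast at ih1 ih2 ih3
        rw [pvPass2_snoc, pvPass2_prev_begin, htrail] at ih3
        simp only [pvBeginD_snoc, pvPrevD_snoc, pvFirstD_snoc, pvChunk_eq, pvChunkL_empty,
          PySem.Chars.len_eq, List.length_nil, Nat.cast_zero] at ih1 ih2 ih3
        rw [show ((s : Int) + 1 - (s : Int)) = 1 from by omega] at ih3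
        rw [show ((s : Int) - ((s : Int) - pvPrevD cuts)) = pvPrevD cuts from by omega]
        refine ⟨ih1, ih2, ?_⟩
        by_cases hcut : cuts = []
        · rw [if_neg (show ¬(pvFirstD cuts ≠ 0) by simp [pvFirstD, hcut])]
          rw [show pvFirstD cuts + 1 = 1 from by simp [pvFirstD, hcut]]
          rw [show (if ((cuts.length : Int)) ≠ 0 then 2 else 0) = (0 : Int) from by
            simp [hcut]] at ih3
          simpa using ih3
        · rw [if_pos (show pvFirstD cuts ≠ 0 by simp [pvFirstD, hcut])]
          rw [show pvFirstD cuts = 1 from by simp [pvFirstD, hcut]]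
          rw [show (if ((cuts.length : Int)) ≠ 0 then 2 else 0) = (2 : Int) from by
            simp [hcut]] at ih3
          simpa using ih3
      · rw [if_neg hc, if_neg hc]
        obtain ⟨ih1, ih2, ih3⟩ := ih (s + 1) cuts (s : Int) hd' (by omega) hb0
          (by push_cast; omega)
        push_cast at ih1 ih2 ih3
        rw [htrail] at ih3
        rw [hlen] at ih1 ih2 ih3 ⊢
        rw [show ((s : Int) - pvPrevD cuts + 1) = ((s : Int) + 1 - pvPrevD cuts) from by omega]
        exact ⟨ih1, ih2, ih3⟩

lemma CorrectData_eq (time_arr : List (List String)) (text_arr : List String)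
    (hne : text_arr ≠ []) : CorrectData time_arr text_arr = CorrectData_alt time_arr text_arr := by
  have hnil : pvChunkL text_arr (pvBeginD []) (some ((0 : Nat) : Int)) = [] := by
    unfold pvChunkL
    rw [show pvBeginD [] = (0 : Int) from rfl,
      PySem.List.slice_toNat text_arr (by omega) (by omega)]
    simp
  obtain ⟨hb0, hble, hfold⟩ := pvLoop_eq time_arr text_arr text_arr 0 [] 0 rfl (by omega)
    (by simp [pvBeginD]) (by simp [pvBeginD])
  rw [hnil] at hb0 hble hfold
  unfold CorrectData CorrectData_alt
  have hinit : ((pvPass2 time_arr text_arr []).1, (pvPass2 time_arr text_arr []).2.1,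
      ([] : List Char), ((0 : Nat) : Int) - pvPrevD [], pvFirstD [], (0 : Int))
      = (([] : List (List String)), ([] : List String), ([] : List Char), (0 : Int), (0 : Int),
         (0 : Int)) := by
    simp [pvPass2, pvPrevD, pvFirstD, PySem.List.enumerate]
  rw [hinit] at hfold
  have hlen0 : PySem.Chars.len ([] : List Char) = 0 := rfl
  rw [hlen0] at hb0 hble hfold
  simp only [Nat.cast_zero] at hb0 hble hfold
  rw [hfold, if_neg hne]
  simp only []
  have hp2 : (PySem.List.enumerate
        ((PySem.List.enumerate text_arr 0).foldl pvStep1 ([], 0)).1 0).foldl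
      (pvStep2 time_arr text_arr) ([], [], 0, 0)
      = pvPass2 time_arr text_arr ((PySem.List.enumerate text_arr 0).foldl pvStep1 ([], 0)).1 := rfl
  rw [hp2]
  have hpb := pvPass2_prev_begin time_arr text_arr
    ((PySem.List.enumerate text_arr 0).foldl pvStep1 ([], 0)).1
  rcases h2 : pvPass2 time_arr text_arr ((PySem.List.enumerate text_arr 0).foldl pvStep1 ([], 0)).1
    with ⟨a, b, p, q⟩
  rw [h2] at hpb
  simp only [Prod.mk.injEq] at hpb
  obtain ⟨hp, hq⟩ := hpb
  subst hp
  subst hq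
  simp only [PySem.List.len_eq, Prod.mk.injEq]
  refine ⟨?_, ?_⟩
  · rw [show ((text_arr.length : Int) - 1 -
        ((text_arr.length : Int) - pvPrevD ((PySem.List.enumerate text_arr 0).foldl pvStep1 ([], 0)).1) + 1)
        = pvPrevD ((PySem.List.enumerate text_arr 0).foldl pvStep1 ([], 0)).1 from by omega]
  · rw [pvChunk_eq, ← pvChunkL_to_none text_arr _ hb0]

-- ===== VERDICT (by name: the statement is the Claim_ definition above) =====
theorem CorrectData_spec : Claim_equal_CorrectData := by
  intro time_arr text_arr _ hpre
  unfold Spec_CorrectData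
  exact CorrectData_eq time_arr text_arr hpre.1
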